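-- pv_equiv track=rewrite | github.com/Whiggsy/Task-11 | alternative.py | alternate_Uppercase_word
-- ===== SOURCE A (Python) =====
-- def alternate_Uppercase_word(s):
--     i = 0
--     word_list = s.split(' ')
--     alternate_upper = []
--     for w in word_list:
--         if i:
--             alternate_upper.append(w.upper())
--         else:
--             alternate_upper.append(w)
--         i = int(not i)
--     return " ".join(alternate_upper)
-- ===== SOURCE B (Python) =====
-- def alternate_Uppercase_word(s):
--     words = s.split(' ')
--     words[1::2] = [w.upper() for w in words[1::2]]
--     return ' '.join(words)
-- ===== Notes on version B (the rewrite author's own statement) =====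
-- stated objective: simpler
-- what changed: Replaces the toggle variable and per-word if/else branch with slice assignment: only the odd-indexed words are extracted, uppercased and written back, then the list is joined.
import Mathlib
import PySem

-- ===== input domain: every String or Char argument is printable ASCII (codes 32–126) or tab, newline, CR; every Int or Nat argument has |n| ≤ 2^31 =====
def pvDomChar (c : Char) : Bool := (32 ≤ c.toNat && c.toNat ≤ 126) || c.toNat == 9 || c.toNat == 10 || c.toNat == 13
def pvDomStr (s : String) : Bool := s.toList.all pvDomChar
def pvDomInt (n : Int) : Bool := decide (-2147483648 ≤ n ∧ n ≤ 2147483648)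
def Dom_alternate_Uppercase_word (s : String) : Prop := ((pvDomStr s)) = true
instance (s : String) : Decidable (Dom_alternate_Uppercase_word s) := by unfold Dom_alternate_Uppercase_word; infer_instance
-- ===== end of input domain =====

-- B replaces A's toggle variable and per-word branch with slice assignment over the
-- odd-indexed words (extract, uppercase, write back), then joins; objective: simpler.


-- ===== PORT A =====
-- literal port: i starts at 0, each word appended plain or uppercased depending on i,
-- i toggled via int(not i)
def alternate_Uppercase_word (s : String) : String :=
  let word_list := (PySem.Str.split? s " ").getD []
  let res := word_list.foldl
    (fun (st : List String × Int) w =>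
      if st.2 ≠ 0 then (st.1 ++ [PySem.Str.upper w], 0)
      else (st.1 ++ [w], 1))
    ([], 0)
  PySem.Str.join " " res.1

-- ===== PORT B =====
-- words[1::2] : the odd-indexed elements
def pvOddSlice : List String → List String
  | [] => []
  | [_] => []
  | _ :: b :: rest => b :: pvOddSlice rest

-- words[1::2] = us : write the list us back onto the odd indices
def pvSetOdd : List String → List String → List String
  | [], _ => []
  | [a], _ => [a]
  | a :: b :: rest, [] => a :: b :: rest
  | a :: _ :: rest, u :: us => a :: u :: pvSetOdd rest us

def alternate_Uppercase_word_alt (s : String) : String :=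
  let words := (PySem.Str.split? s " ").getD []
  let ups := (pvOddSlice words).map PySem.Str.upper
  PySem.Str.join " " (pvSetOdd words ups)

-- ===== PRECONDITION & SPEC =====
def Spec_alternate_Uppercase_word (s : String) (out : String) : Prop := out = alternate_Uppercase_word_alt s
instance (s : String) (out : String) : Decidable (Spec_alternate_Uppercase_word s out) := by unfold Spec_alternate_Uppercase_word; infer_instance

-- ===== CLAIM (what is proved, stated in full; the proofs are below) =====
def Claim_equal_alternate_Uppercase_word : Prop := ∀ (s : String), Dom_alternate_Uppercase_word s → Spec_alternate_Uppercase_word s (alternate_Uppercase_word s)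

-- ===== LEMMAS AND PROOFS =====

-- proof-side characterisation of A's alternating loop (toggle as a Bool)
def pvAlt2 : Bool → List String → List String
  | _, [] => []
  | false, w :: r => w :: pvAlt2 true r
  | true, w :: r => PySem.Str.upper w :: pvAlt2 false r

theorem pvLoopGen (l : List String) : ∀ (acc : List String) (i : Int),
    (l.foldl
      (fun (st : List String × Int) w =>
        if st.2 ≠ 0 then (st.1 ++ [PySem.Str.upper w], 0)
        else (st.1 ++ [w], 1))
      (acc, i)).1 = acc ++ pvAlt2 (decide (i ≠ 0)) l := by
  induction l with
  | nil => intro acc i; simp [pvAlt2]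
  | cons w r ih =>
    intro acc i
    by_cases h : i = 0
    · subst h
      rw [List.foldl,
        show (if ((acc, (0 : Int)).2 ≠ 0) then ((acc, (0 : Int)).1 ++ [PySem.Str.upper w], (0 : Int))
              else ((acc, (0 : Int)).1 ++ [w], 1)) = (acc ++ [w], (1 : Int)) from by simp,
        ih]
      simp [pvAlt2]
    · rw [List.foldl,
        show (if ((acc, i).2 ≠ 0) then ((acc, i).1 ++ [PySem.Str.upper w], (0 : Int))
              else ((acc, i).1 ++ [w], 1)) = (acc ++ [PySem.Str.upper w], (0 : Int)) from by simp [h],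
        ih]
      simp [h, pvAlt2]

theorem pvAlt2_eq : ∀ (l : List String),
    pvAlt2 false l = pvSetOdd l ((pvOddSlice l).map PySem.Str.upper)
  | [] => rfl
  | [_] => rfl
  | a :: b :: r => by
      simp [pvAlt2, pvOddSlice, pvSetOdd, pvAlt2_eq r]

-- ===== VERDICT (by name: the statement is the Claim_ definition above) =====
theorem alternate_Uppercase_word_spec : Claim_equal_alternate_Uppercase_word := by
  intro s _
  unfold Spec_alternate_Uppercase_word alternate_Uppercase_word alternate_Uppercase_word_alt
  simp only []
  rw [pvLoopGen]
  simp [pvAlt2_eq]
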